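-- pv_equiv track=rewrite | github.com/jbuzzell/wiki_titles_singable_to_x | syllable_count.py | parse_abbr
-- ===== SOURCE A (Python) =====
-- def parse_abbr(abbr):
--     count = 0
--
--     for i in abbr:
--         if i == 'w':
--             count += 3
--         else:
--             count += 1
--
--     return count
-- ===== SOURCE B (Python) =====
-- def parse_abbr(abbr):
--     # Closed form: every char counts 1, each 'w' contributes 2 extra.
--     return len(abbr) + 2 * abbr.count('w')
-- ===== Notes on version B (the rewrite author's own statement) =====
-- stated objective: faster
-- what changed: Replaced the character-by-character branch-and-accumulate loop with the closed form len(abbr) + 2*abbr.count('w'), two C-level library calls.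
import Mathlib
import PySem

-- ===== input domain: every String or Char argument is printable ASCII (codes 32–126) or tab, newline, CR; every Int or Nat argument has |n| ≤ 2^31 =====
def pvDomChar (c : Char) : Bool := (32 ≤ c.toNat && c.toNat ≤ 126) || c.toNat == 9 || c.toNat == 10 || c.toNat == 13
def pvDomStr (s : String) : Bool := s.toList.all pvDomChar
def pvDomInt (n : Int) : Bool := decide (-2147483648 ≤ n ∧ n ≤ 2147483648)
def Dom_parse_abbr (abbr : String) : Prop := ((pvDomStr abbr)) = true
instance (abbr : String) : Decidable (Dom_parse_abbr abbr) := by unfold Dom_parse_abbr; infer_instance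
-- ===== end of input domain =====

-- B replaces A's character-by-character branch-and-accumulate loop with the
-- closed form len(abbr) + 2*abbr.count('w') (idiomatic; same asymptotic cost).


-- ===== PORT A =====
def parse_abbr (abbr : String) : Int :=
  abbr.toList.foldl (fun count i => if i == 'w' then count + 3 else count + 1) 0

-- ===== PORT B =====
def parse_abbr_alt (abbr : String) : Int :=
  PySem.Str.len abbr + 2 * (PySem.Str.count abbr "w" : Int)

-- ===== PRECONDITION & SPEC =====
def Spec_parse_abbr (abbr : String) (out : Int) : Prop := out = parse_abbr_alt abbr
instance (abbr : String) (out : Int) : Decidable (Spec_parse_abbr abbr out) := by unfold Spec_parse_abbr; infer_instance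

-- ===== CLAIM (what is proved, stated in full; the proofs are below) =====
def Claim_equal_parse_abbr : Prop := ∀ (abbr : String), Dom_parse_abbr abbr → Spec_parse_abbr abbr (parse_abbr abbr)

-- ===== LEMMAS AND PROOFS =====

-- PySem.Chars.count.go with the single-character needle ['w'] counts occurrences of 'w'.
theorem go_count (fuel : Nat) (l : List Char) (k : Nat) (h : l.length ≤ fuel) :
    PySem.Chars.count.go ['w'] fuel l k = k + l.count 'w' := by
  induction fuel generalizing l k with
  | zero =>
    have : l = [] := List.eq_nil_of_length_eq_zero (Nat.le_zero.mp h)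
    subst this; rfl
  | succ n ih =>
    cases l with
    | nil => rfl
    | cons c t =>
      have hstep : PySem.Chars.count.go ['w'] (n+1) (c :: t) k =
          if ['w'].isPrefixOf (c :: t) then PySem.Chars.count.go ['w'] n (List.drop 1 (c :: t)) (k+1)
          else PySem.Chars.count.go ['w'] n t k := rfl
      rw [hstep]
      by_cases hc : c = 'w'
      · subst hc
        rw [if_pos (by simp [List.isPrefixOf])]
        simp only [List.drop_succ_cons, List.drop_zero]
        rw [ih t (k+1) (by simpa using h)]
        simp; omega
      · rw [if_neg (by simp; exact fun h => absurd h.symm hc)]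
        rw [ih t k (by simpa using h)]
        simp [hc]

theorem str_count_w (s : String) : PySem.Str.count s "w" = s.toList.count 'w' := by
  rw [PySem.Str.count_eq]
  show PySem.Chars.count s.toList ['w'] = _
  rw [PySem.Chars.count]
  simpa using go_count s.toList.length s.toList 0 le_rfl

-- A's loop computes length + 2 * (count of 'w').
theorem foldl_count_w (l : List Char) (a : Int) :
    l.foldl (fun count i => if i == 'w' then count + 3 else count + 1) a
      = a + l.length + 2 * (l.count 'w' : Int) := by
  induction l generalizing a with
  | nil => simp
  | cons c t ih =>
    by_cases hc : c = 'w'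
    · subst hc
      simp only [List.foldl_cons, beq_self_eq_true, if_true, ih, List.count_cons, List.length_cons]
      simp; ring
    · simp only [List.foldl_cons, ih, List.count_cons, List.length_cons]
      rw [if_neg (by simpa using hc)]
      simp [hc]; ring

-- ===== VERDICT (by name: the statement is the Claim_ definition above) =====
theorem parse_abbr_spec : Claim_equal_parse_abbr := by
  intro abbr _
  unfold Spec_parse_abbr parse_abbr parse_abbr_alt
  rw [foldl_count_w, str_count_w, PySem.Str.len_eq]
  ring
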